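-- pv_equiv track=rewrite | github.com/angel-acp10/SC-font-Carray | Carray-font-gen.py | SortRanges
-- ===== SOURCE A (Python) =====
-- def SortRanges(raw_rg_s, raw_rg_e, raw_str):
--
--     #once we have 'range_start', 'range_end' and 'string', let's include all
--     #unicode codes into buff_list
--     buff_list = []
--
--     #include ranges
--     for s, e in zip(raw_rg_s, raw_rg_e):
--         for uc_idx in range(s,e+1):
--             buff_list.append(uc_idx)
--
--     #and the strings
--     for char in raw_str:
--         buff_list.append(ord(char))
--
--     #remove duplicates unicode indexes
--     buff_list = list(set(buff_list))
--
--     #sorts the list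
--     buff_list.sort()
--
--     #sweep the entire buffer and find all its new ranges
--     rg_start = [buff_list[0]]
--     rg_end = [buff_list[0]]
--     rg_ch_info_idx = [0]
--     for i in range(len(buff_list)-1):
--         if buff_list[i]+1 == buff_list[i+1]:
--             rg_end[-1] += 1
--         else:
--             rg_start.append(buff_list[i+1])
--             rg_end.append(buff_list[i+1])
--             rg_ch_info_idx.append(i+1)
--
--     return(rg_start, rg_end, rg_ch_info_idx)
-- ===== SOURCE B (Python) =====
-- def SortRanges(raw_rg_s, raw_rg_e, raw_str):
--     # collect intervals (never expanding them into individual codepoints)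
--     iv = [(s, e) for s, e in zip(raw_rg_s, raw_rg_e) if s <= e]
--     for char in raw_str:
--         c = ord(char)
--         iv.append((c, c))
--     iv.sort(key=lambda p: p[0])
--
--     # merge overlapping or adjacent intervals
--     merged = []
--     for s, e in iv:
--         if merged and s <= merged[-1][1] + 1:
--             ls, le = merged[-1]
--             if e > le:
--                 merged[-1] = (ls, e)
--         else:
--             merged.append((s, e))
--
--     # derive the char-info indices from cumulative interval sizes
--     rg_start = [s for s, _ in merged]
--     rg_end = [e for _, e in merged]
--     rg_ch_info_idx = []
--     acc = 0
--     for s, e in merged: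
--         rg_ch_info_idx.append(acc)
--         acc += e - s + 1
--     return (rg_start, rg_end, rg_ch_info_idx)
-- ===== Notes on version B (the rewrite author's own statement) =====
-- stated objective: faster
-- what changed: Instead of expanding every range into individual codepoints, deduplicating and sorting them and scanning element by element, B sorts the intervals themselves by start, merges overlapping/adjacent intervals, and derives the char-info indices from cumulative interval sizes, so cost no longer depends on the total span of the ranges.
-- crash fix: A raises IndexError when no codepoint is given (empty string and every range empty, i.e. start > end); B returns ([], [], []) there. — e.g. on SortRanges([], [], ""): A raises IndexError, B returns ([], [], [])
import Mathlib
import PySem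

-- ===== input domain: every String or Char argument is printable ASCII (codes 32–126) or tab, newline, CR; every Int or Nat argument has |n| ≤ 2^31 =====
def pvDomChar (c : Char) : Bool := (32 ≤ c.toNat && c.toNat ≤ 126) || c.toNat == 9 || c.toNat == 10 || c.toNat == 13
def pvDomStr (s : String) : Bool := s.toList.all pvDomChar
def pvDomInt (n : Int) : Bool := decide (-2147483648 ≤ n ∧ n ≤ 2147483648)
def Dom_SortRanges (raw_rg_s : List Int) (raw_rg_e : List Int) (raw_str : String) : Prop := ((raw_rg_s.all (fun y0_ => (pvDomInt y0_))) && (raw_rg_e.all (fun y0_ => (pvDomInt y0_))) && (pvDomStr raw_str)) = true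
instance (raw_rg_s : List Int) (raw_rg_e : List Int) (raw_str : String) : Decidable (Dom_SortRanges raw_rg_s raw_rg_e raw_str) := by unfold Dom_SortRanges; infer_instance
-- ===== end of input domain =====

-- B merges the sorted intervals themselves instead of expanding every range into
-- individual codepoints, so its cost is independent of the spans (objective: faster).

-- ===== PORT A =====
-- helper for `list(set(buff_list))` + `.sort()`: the set's hash order is unobservable
-- (the list is sorted immediately), so the sorted duplicate-free list is computed as
-- an O(n log n) sort followed by an adjacent dedup — the same value, evaluable on wide ranges
def pvAdjDedupGo (prev : Int) (acc : List Int) : List Int → List Int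
  | [] => acc.reverse
  | y :: ys => if y = prev then pvAdjDedupGo prev acc ys else pvAdjDedupGo y (y :: acc) ys

def pvAdjDedup : List Int → List Int
  | [] => []
  | x :: xs => pvAdjDedupGo x [x] xs

-- buff_list[i] of the scan: every index there is non-negative and in range, where
-- Array.getD i.toNat 0 is exactly Python's O(1) list indexing
def pvIdxGet (arr : Array Int) (i : Int) : Int := arr.getD i.toNat 0

-- helper for Python's `rg_end[-1] += 1` (increment the last element)
def pvIncLast : List Int → List Int
  | [] => []
  | [x] => [x + 1]
  | x :: xs => x :: pvIncLast xs

def SortRanges (raw_rg_s : List Int) (raw_rg_e : List Int) (raw_str : String) : List Int × List Int × List Int :=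
  -- buff_list: expand every range, then the string's codepoints
  let buff0 := (raw_rg_s.zip raw_rg_e).foldl (fun acc se => acc ++ PySem.List.pyRange se.1 (se.2 + 1) 1) []
  let buff1 := raw_str.toList.foldl (fun acc c => acc ++ [(c.toNat : Int)]) buff0
  -- buff_list = list(set(buff_list)); buff_list.sort()
  let L := pvAdjDedup (buff1.mergeSort (fun a b => decide (a ≤ b)))
  let arr := L.toArray
  match L with
  | [] => ([], [], [])   -- Python raises IndexError here (excluded by Pre_SortRanges)
  | h :: _ =>
    (PySem.List.pyRange 0 ((L.length : Int) - 1) 1).foldl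
      (fun st i =>
        if pvIdxGet arr i + 1 = pvIdxGet arr (i + 1) then
          (st.1, pvIncLast st.2.1, st.2.2)
        else
          (st.1 ++ [pvIdxGet arr (i + 1)],
           st.2.1 ++ [pvIdxGet arr (i + 1)],
           st.2.2 ++ [i + 1]))
      ([h], [h], [(0 : Int)])

-- ===== PORT B =====
-- one step of B's merge loop (`merged` grows at the back, its last interval may widen)
def pvMergeStep (acc : List (Int × Int)) (se : Int × Int) : List (Int × Int) :=
  match acc.getLast? with
  | some (ls, le) =>
    if se.1 ≤ le + 1 then
      (if le < se.2 then acc.dropLast ++ [(ls, se.2)] else acc)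
    else acc ++ [se]
  | none => [se]

def SortRanges_alt (raw_rg_s : List Int) (raw_rg_e : List Int) (raw_str : String) : List Int × List Int × List Int :=
  let iv0 := (raw_rg_s.zip raw_rg_e).filter (fun se => decide (se.1 ≤ se.2))
  let iv1 := raw_str.toList.foldl (fun acc c => acc ++ [((c.toNat : Int), (c.toNat : Int))]) iv0
  let iv := PySem.List.sorted iv1 (fun p => p.1) false
  let merged := iv.foldl pvMergeStep []
  let rg_start := merged.map (fun p => p.1)
  let rg_end := merged.map (fun p => p.2)
  let rg_ch_info_idx :=
    (merged.foldl (fun st se => (st.1 ++ [st.2], st.2 + se.2 - se.1 + 1)) (([] : List Int), (0 : Int))).1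
  (rg_start, rg_end, rg_ch_info_idx)

-- ===== PRECONDITION & SPEC =====
-- Pre_ excludes exactly the inputs with no codepoint at all (empty string and every
-- range empty), on which A raises IndexError at buff_list[0].
def Pre_SortRanges (raw_rg_s : List Int) (raw_rg_e : List Int) (raw_str : String) : Prop :=
  raw_str ≠ "" ∨ ∃ p ∈ raw_rg_s.zip raw_rg_e, p.1 ≤ p.2
instance (raw_rg_s : List Int) (raw_rg_e : List Int) (raw_str : String) : Decidable (Pre_SortRanges raw_rg_s raw_rg_e raw_str) := by unfold Pre_SortRanges; infer_instance
def pvWitness_SortRanges : List Int × List Int × String := ([0], [2], "a")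

-- A raises IndexError when no codepoint is given (empty string and every range empty, i.e. start > end); B returns ([], [], []) there.
def Raises_SortRanges (raw_rg_s : List Int) (raw_rg_e : List Int) (raw_str : String) : Prop :=
  raw_str = "" ∧ ∀ p ∈ raw_rg_s.zip raw_rg_e, p.2 < p.1
instance (raw_rg_s : List Int) (raw_rg_e : List Int) (raw_str : String) : Decidable (Raises_SortRanges raw_rg_s raw_rg_e raw_str) := by unfold Raises_SortRanges; infer_instance
def pvRaiseWitness_SortRanges : List Int × List Int × String := ([], [], "")
def pvRaiseWitnessOut_SortRanges : List Int × List Int × List Int := ([], [], [])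

def Spec_SortRanges (raw_rg_s : List Int) (raw_rg_e : List Int) (raw_str : String) (out : List Int × List Int × List Int) : Prop := out = SortRanges_alt raw_rg_s raw_rg_e raw_str
instance (raw_rg_s : List Int) (raw_rg_e : List Int) (raw_str : String) (out : List Int × List Int × List Int) : Decidable (Spec_SortRanges raw_rg_s raw_rg_e raw_str out) := by unfold Spec_SortRanges; infer_instance

-- ===== CLAIM (what is proved, stated in full; the proofs are below) =====
def Claim_equal_SortRanges : Prop := ∀ (raw_rg_s : List Int) (raw_rg_e : List Int) (raw_str : String), Dom_SortRanges raw_rg_s raw_rg_e raw_str → Pre_SortRanges raw_rg_s raw_rg_e raw_str → Spec_SortRanges raw_rg_s raw_rg_e raw_str (SortRanges raw_rg_s raw_rg_e raw_str)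
def Claim_raises_SortRanges : Prop := (∀ (raw_rg_s : List Int) (raw_rg_e : List Int) (raw_str : String), Dom_SortRanges raw_rg_s raw_rg_e raw_str → Raises_SortRanges raw_rg_s raw_rg_e raw_str → ¬ Pre_SortRanges raw_rg_s raw_rg_e raw_str) ∧ (Dom_SortRanges (pvRaiseWitness_SortRanges.1) (pvRaiseWitness_SortRanges.2.1) (pvRaiseWitness_SortRanges.2.2) ∧ Raises_SortRanges (pvRaiseWitness_SortRanges.1) (pvRaiseWitness_SortRanges.2.1) (pvRaiseWitness_SortRanges.2.2) ∧ SortRanges_alt (pvRaiseWitness_SortRanges.1) (pvRaiseWitness_SortRanges.2.1) (pvRaiseWitness_SortRanges.2.2) = pvRaiseWitnessOut_SortRanges)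

-- ===== LEMMAS AND PROOFS =====

def pvRuns (lo prev : Int) : List Int → List (Int × Int)
  | [] => [(lo, prev)]
  | y :: ys => if prev + 1 = y then pvRuns lo y ys else (lo, prev) :: pvRuns y y ys
def pvIdxList (c : Int) : List (Int × Int) → List Int
  | [] => []
  | (s, e) :: rs => c :: pvIdxList (c + e - s + 1) rs
def pvScanR (lo prev i : Int) : List Int → List Int × List Int × List Int
  | [] => ([lo], [prev], [])
  | y :: ys =>
    if prev + 1 = y then pvScanR lo y (i + 1) ys
    else
      let r := pvScanR y y (i + 1) ys
      (lo :: r.1, prev :: r.2.1, (i + 1) :: r.2.2)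
def pvMemIv (x : Int) (M : List (Int × Int)) : Prop := ∃ p ∈ M, p.1 ≤ x ∧ x ≤ p.2
def pvWF (M : List (Int × Int)) : Prop :=
  (∀ p ∈ M, p.1 ≤ p.2) ∧ M.Pairwise (fun a b => a.2 + 1 < b.1)

theorem pvScanR_idx (t : List Int) : ∀ lo prev c i, i = c + (prev - lo) →
    c :: (pvScanR lo prev i t).2.2 = pvIdxList c (pvRuns lo prev t) := by
  induction t with
  | nil => intro lo prev c i hi; simp [pvScanR, pvRuns, pvIdxList]
  | cons y ys ih =>
    intro lo prev c i hi
    by_cases h : prev + 1 = y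
    · simp only [pvScanR, pvRuns, if_pos h]
      exact ih lo y c (i + 1) (by omega)
    · simp only [pvScanR, pvRuns, if_neg h, pvIdxList]
      have := ih y y (i + 1) (i + 1) (by omega)
      have hc : c + prev - lo + 1 = i + 1 := by omega
      rw [hc]
      simpa using this

theorem pvScanR_fst (t : List Int) : ∀ lo prev i,
    (pvScanR lo prev i t).1 = (pvRuns lo prev t).map Prod.fst := by
  induction t with
  | nil => intro lo prev i; rfl
  | cons y ys ih =>
    intro lo prev i
    by_cases h : prev + 1 = y <;> simp [pvScanR, pvRuns, h, ih]

theorem pvScanR_snd (t : List Int) : ∀ lo prev i,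
    (pvScanR lo prev i t).2.1 = (pvRuns lo prev t).map Prod.snd := by
  induction t with
  | nil => intro lo prev i; rfl
  | cons y ys ih =>
    intro lo prev i
    by_cases h : prev + 1 = y <;> simp [pvScanR, pvRuns, h, ih]

theorem pvRuns_start_mem (t : List Int) : ∀ lo prev q, q ∈ pvRuns lo prev t → q.1 = lo ∨ q.1 ∈ t := by
  induction t with
  | nil => intro lo prev q hq; simp [pvRuns] at hq; simp [hq]
  | cons y ys ih =>
    intro lo prev q hq
    by_cases h : prev + 1 = y
    · simp only [pvRuns, if_pos h] at hq
      rcases ih lo y q hq with h1 | h1 <;> simp [h1]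
    · simp only [pvRuns, if_neg h] at hq
      rcases List.mem_cons.mp hq with h1 | h1
      · simp [h1]
      · rcases ih y y q h1 with h2 | h2 <;> simp [h2]

theorem pvRuns_WF (t : List Int) : ∀ lo prev, lo ≤ prev → (prev :: t).Pairwise (· < ·) →
    pvWF (pvRuns lo prev t) := by
  induction t with
  | nil =>
    intro lo prev hle _
    refine ⟨?_, by simp [pvRuns]⟩
    intro p hp; simp [pvRuns] at hp; subst hp; exact hle
  | cons y ys ih =>
    intro lo prev hle hp
    rw [List.pairwise_cons] at hp
    have hpy : prev < y := hp.1 y (by simp)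
    by_cases h : prev + 1 = y
    · simp only [pvRuns, if_pos h]
      exact ih lo y (by omega) hp.2
    · simp only [pvRuns, if_neg h]
      have hwf := ih y y le_rfl hp.2
      refine ⟨?_, ?_⟩
      · intro p hp'
        rcases List.mem_cons.mp hp' with hp' | hp'
        · simp_all
        · exact hwf.1 p hp'
      · rw [List.pairwise_cons]
        refine ⟨?_, hwf.2⟩
        intro q hq
        rcases pvRuns_start_mem ys y y q hq with h1 | h1
        · omega
        · have := (List.pairwise_cons.mp hp.2).1 q.1 h1; omega

theorem pvRuns_mem (t : List Int) : ∀ lo prev x, lo ≤ prev → (prev :: t).Pairwise (· < ·) →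
    (pvMemIv x (pvRuns lo prev t) ↔ (lo ≤ x ∧ x ≤ prev) ∨ x ∈ t) := by
  induction t with
  | nil => intro lo prev x hle _; simp [pvRuns, pvMemIv]
  | cons y ys ih =>
    intro lo prev x hle hp
    rw [List.pairwise_cons] at hp
    have hpy : prev < y := hp.1 y (by simp)
    by_cases h : prev + 1 = y
    · simp only [pvRuns, if_pos h]
      rw [ih lo y x (by omega) hp.2]
      constructor
      · rintro (⟨h1, h2⟩ | h1)
        · by_cases hx : x ≤ prev
          · exact Or.inl ⟨h1, hx⟩
          · exact Or.inr (by simp; left; omega)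
        · exact Or.inr (by simp [h1])
      · rintro (⟨h1, h2⟩ | h1)
        · exact Or.inl ⟨h1, by omega⟩
        · simp at h1
          rcases h1 with h1 | h1
          · exact Or.inl ⟨by omega, by omega⟩
          · exact Or.inr h1
    · simp only [pvRuns, if_neg h]
      have := ih y y x le_rfl hp.2
      simp only [pvMemIv] at this ⊢
      constructor
      · rintro ⟨p, hp', hx⟩
        rcases List.mem_cons.mp hp' with hp' | hp'
        · subst hp'; exact Or.inl hx
        · rcases this.mp ⟨p, hp', hx⟩ with h1 | h1
          · exact Or.inr (by simp; left; omega)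
          · exact Or.inr (by simp [h1])
      · rintro (h1 | h1)
        · exact ⟨(lo, prev), by simp, h1⟩
        · simp at h1
          rcases h1 with h1 | h1
          · rcases this.mpr (Or.inl (by omega)) with ⟨p, hp', hx⟩
            exact ⟨p, by simp [hp'], hx⟩
          · rcases this.mpr (Or.inr h1) with ⟨p, hp', hx⟩
            exact ⟨p, by simp [hp'], hx⟩

theorem pvMem_lb (M : List (Int × Int)) (s e : Int) (hwf : pvWF ((s, e) :: M)) :
    ∀ x, pvMemIv x ((s, e) :: M) → s ≤ x := by
  rintro x ⟨p, hp, h1, h2⟩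
  have h0 : s ≤ e := hwf.1 (s, e) (by simp)
  rcases List.mem_cons.mp hp with hp | hp
  · subst hp; exact h1
  · have h3 : e + 1 < p.1 := (List.pairwise_cons.mp hwf.2).1 p hp
    omega

theorem pvMem_tail (M : List (Int × Int)) (s e : Int) (hwf : pvWF ((s, e) :: M)) (x : Int) :
    pvMemIv x M ↔ pvMemIv x ((s, e) :: M) ∧ e < x := by
  constructor
  · rintro ⟨p, hp, h1, h2⟩
    have h3 : e + 1 < p.1 := (List.pairwise_cons.mp hwf.2).1 p hp
    exact ⟨⟨p, by simp [hp], h1, h2⟩, by omega⟩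
  · rintro ⟨⟨p, hp, h1, h2⟩, hx⟩
    rcases List.mem_cons.mp hp with hp | hp
    · subst hp; simp at h2; omega
    · exact ⟨p, hp, h1, h2⟩

theorem pvWF_unique (M1 : List (Int × Int)) : ∀ M2, pvWF M1 → pvWF M2 →
    (∀ x, pvMemIv x M1 ↔ pvMemIv x M2) → M1 = M2 := by
  induction M1 with
  | nil =>
    intro M2 _ hwf2 hmem
    cases M2 with
    | nil => rfl
    | cons p M2' =>
      exfalso
      have : pvMemIv p.1 (p :: M2') := ⟨p, by simp, le_rfl, hwf2.1 p (by simp)⟩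
      rcases (hmem p.1).mpr this with ⟨q, hq, _⟩
      simp at hq
  | cons p M1' ih =>
    intro M2 hwf1 hwf2 hmem
    cases M2 with
    | nil =>
      exfalso
      have : pvMemIv p.1 (p :: M1') := ⟨p, by simp, le_rfl, hwf1.1 p (by simp)⟩
      rcases (hmem p.1).mp this with ⟨q, hq, _⟩
      simp at hq
    | cons q M2' =>
      obtain ⟨s1, e1⟩ := p
      obtain ⟨s2, e2⟩ := q
      have h11 : s1 ≤ e1 := hwf1.1 (s1, e1) (by simp)
      have h22 : s2 ≤ e2 := hwf2.1 (s2, e2) (by simp)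
      have hm1 : pvMemIv s1 ((s1, e1) :: M1') := ⟨(s1, e1), by simp, le_rfl, h11⟩
      have hm2 : pvMemIv s2 ((s2, e2) :: M2') := ⟨(s2, e2), by simp, le_rfl, h22⟩
      have hs12 : s2 ≤ s1 := pvMem_lb M2' s2 e2 hwf2 s1 ((hmem s1).mp hm1)
      have hs21 : s1 ≤ s2 := pvMem_lb M1' s1 e1 hwf1 s2 ((hmem s2).mpr hm2)
      have hs : s1 = s2 := le_antisymm hs21 hs12
      have he : e1 = e2 := by
        by_contra hne
        rcases lt_or_gt_of_ne hne with hlt | hlt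
        · -- e1 < e2 : e1+1 ∈ M2 but not M1
          have hmem2 : pvMemIv (e1 + 1) ((s2, e2) :: M2') := ⟨(s2, e2), by simp, by omega, by omega⟩
          rcases (hmem _).mpr hmem2 with ⟨r, hr, hr1, hr2⟩
          rcases List.mem_cons.mp hr with hr | hr
          · obtain rfl := hr; simp at hr2
          · have : e1 + 1 < r.1 := (List.pairwise_cons.mp hwf1.2).1 r hr; omega
        · have hmem1 : pvMemIv (e2 + 1) ((s1, e1) :: M1') := ⟨(s1, e1), by simp, by omega, by omega⟩
          rcases (hmem _).mp hmem1 with ⟨r, hr, hr1, hr2⟩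
          rcases List.mem_cons.mp hr with hr | hr
          · obtain rfl := hr; simp at hr2
          · have : e2 + 1 < r.1 := (List.pairwise_cons.mp hwf2.2).1 r hr; omega
      have hwf1' : pvWF M1' := ⟨fun r hr => hwf1.1 r (by simp [hr]), (List.pairwise_cons.mp hwf1.2).2⟩
      have hwf2' : pvWF M2' := ⟨fun r hr => hwf2.1 r (by simp [hr]), (List.pairwise_cons.mp hwf2.2).2⟩
      have htail : ∀ x, pvMemIv x M1' ↔ pvMemIv x M2' := by
        intro x
        rw [pvMem_tail M1' s1 e1 hwf1 x, pvMem_tail M2' s2 e2 hwf2 x, hmem x, he]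
      rw [hs, he, ih M2' hwf1' hwf2' htail]

theorem pvMerge_inv (iv : List (Int × Int)) : ∀ acc,
    (∀ p ∈ iv, p.1 ≤ p.2) → iv.Pairwise (fun a b => a.1 ≤ b.1) →
    pvWF acc → (∀ q ∈ acc, ∀ p ∈ iv, q.1 ≤ p.1) →
    pvWF (iv.foldl pvMergeStep acc) ∧
      (∀ x, pvMemIv x (iv.foldl pvMergeStep acc) ↔ pvMemIv x acc ∨ pvMemIv x iv) := by
  induction iv with
  | nil => intro acc _ _ hwf _; exact ⟨hwf, fun x => by simp [pvMemIv]⟩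
  | cons p ivs ih =>
    intro acc hle hsort hwf hstart
    obtain ⟨s, e⟩ := p
    have hse : s ≤ e := hle (s, e) (by simp)
    have hsort' := (List.pairwise_cons.mp hsort).2
    have hsfst := (List.pairwise_cons.mp hsort).1   -- ∀ q ∈ ivs, s ≤ q.1
    have hle' : ∀ p ∈ ivs, p.1 ≤ p.2 := fun q hq => hle q (by simp [hq])
    -- facts about acc' = pvMergeStep acc (s, e)
    have key : pvWF (pvMergeStep acc (s, e)) ∧
        (∀ q ∈ pvMergeStep acc (s, e), ∀ r ∈ ivs, q.1 ≤ r.1) ∧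
        (∀ x, pvMemIv x (pvMergeStep acc (s, e)) ↔ pvMemIv x acc ∨ (s ≤ x ∧ x ≤ e)) := by
      rcases List.eq_nil_or_concat' acc with rfl | ⟨A, q, rfl⟩
      · refine ⟨⟨by simp [pvMergeStep, hse], by simp [pvMergeStep]⟩, ?_, ?_⟩
        · intro q hq r hr
          simp [pvMergeStep] at hq
          subst hq
          exact hsfst r hr
        · intro x; simp [pvMergeStep, pvMemIv]
      · obtain ⟨ls, le⟩ := q
        have hlast : (A ++ [(ls, le)]).getLast? = some (ls, le) := by simp
        have hdrop : (A ++ [(ls, le)]).dropLast = A := by simp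
        have hlsle : ls ≤ le := hwf.1 (ls, le) (by simp)
        have hAwf : ∀ r ∈ A, r.1 ≤ r.2 := fun r hr => hwf.1 r (by simp [hr])
        have hApw : A.Pairwise (fun a b => a.2 + 1 < b.1) := (List.pairwise_append.mp hwf.2).1
        have hAlast : ∀ r ∈ A, r.2 + 1 < ls := by
          intro r hr
          have := (List.pairwise_append.mp hwf.2).2.2 r hr (ls, le) (by simp)
          exact this
        have hlss : ls ≤ s := hstart (ls, le) (by simp) (s, e) (by simp)
        by_cases hcond : s ≤ le + 1
        · by_cases hwide : le < e
          · simp only [pvMergeStep, hlast, hdrop, if_pos hcond, if_pos hwide]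
            refine ⟨⟨?_, ?_⟩, ?_, ?_⟩
            · intro r hr
              rcases List.mem_append.mp hr with hr | hr
              · exact hAwf r hr
              · simp at hr; subst hr; simp; omega
            · rw [List.pairwise_append]
              exact ⟨hApw, by simp, fun r hr r' hr' => by
                simp at hr'; subst hr'; simpa using hAlast r hr⟩
            · intro q hq r hr
              rcases List.mem_append.mp hq with hq | hq
              · have h1 := hAlast q hq
                have h2 := hAwf q hq
                have h3 := hsfst r hr
                omega
              · simp at hq; subst hq; simp; exact le_trans hlss (hsfst r hr)
            · intro x
              simp only [pvMemIv]
              constructor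
              · rintro ⟨r, hr, h1, h2⟩
                rcases List.mem_append.mp hr with hr | hr
                · exact Or.inl ⟨r, by simp [hr], h1, h2⟩
                · simp at hr; subst hr
                  simp at h1 h2
                  by_cases hx : x ≤ le
                  · exact Or.inl ⟨(ls, le), by simp, h1, hx⟩
                  · exact Or.inr ⟨by omega, h2⟩
              · rintro (⟨r, hr, h1, h2⟩ | ⟨h1, h2⟩)
                · rcases List.mem_append.mp hr with hr | hr
                  · exact ⟨r, by simp [hr], h1, h2⟩
                  · simp at hr; subst hr
                    simp at h1 h2
                    exact ⟨(ls, e), by simp, by simpa using h1, by simp; omega⟩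
                · exact ⟨(ls, e), by simp, by simp; omega, by simpa using h2⟩
          · simp only [pvMergeStep, hlast, hdrop, if_pos hcond, if_neg hwide]
            refine ⟨hwf, ?_, ?_⟩
            · intro q hq r hr
              rcases List.mem_append.mp hq with hq | hq
              · have h1 := hAlast q hq
                have h2 := hAwf q hq
                have h3 := hsfst r hr
                omega
              · simp at hq; subst hq; simp; exact le_trans hlss (hsfst r hr)
            · intro x
              simp only [pvMemIv]
              constructor
              · rintro ⟨r, hr, h1, h2⟩; exact Or.inl ⟨r, hr, h1, h2⟩
              · rintro (⟨r, hr, h1, h2⟩ | ⟨h1, h2⟩)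
                · exact ⟨r, hr, h1, h2⟩
                · exact ⟨(ls, le), by simp, by omega, by omega⟩
        · simp only [pvMergeStep, hlast, if_neg hcond]
          refine ⟨⟨?_, ?_⟩, ?_, ?_⟩
          · intro r hr
            rcases List.mem_append.mp hr with hr | hr
            · exact hwf.1 r hr
            · simp at hr; subst hr; simpa using hse
          · rw [List.pairwise_append]
            refine ⟨hwf.2, by simp, ?_⟩
            intro r hr r' hr'
            simp at hr'; subst hr'
            rcases List.mem_append.mp hr with hr | hr
            · have := hAlast r hr; simp; omega
            · simp at hr; subst hr; simp; omega
          · intro q hq r hr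
            rcases List.mem_append.mp hq with hq | hq
            · exact hstart q (by simp [hq]) r (by simp [hr])
            · simp at hq; subst hq; simpa using hsfst r hr
          · intro x
            simp only [pvMemIv]
            constructor
            · rintro ⟨r, hr, h1, h2⟩
              rcases List.mem_append.mp hr with hr | hr
              · exact Or.inl ⟨r, hr, h1, h2⟩
              · simp at hr; subst hr; simp at h1 h2; exact Or.inr ⟨h1, h2⟩
            · rintro (⟨r, hr, h1, h2⟩ | ⟨h1, h2⟩)
              · rcases List.mem_append.mp hr with hr | hr
                · exact ⟨r, by simp [hr], h1, h2⟩
                · simp at hr; subst hr; exact ⟨(ls, le), by simp, by simpa using h1, by simpa using h2⟩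
              · exact ⟨(s, e), by simp, by simpa using h1, by simpa using h2⟩
    obtain ⟨kwf, kstart, kmem⟩ := key
    have := ih (pvMergeStep acc (s, e)) hle' hsort' kwf kstart
    refine ⟨by simpa using this.1, ?_⟩
    intro x
    have h2 := this.2 x
    simp only [List.foldl_cons] at *
    rw [h2, kmem x]
    simp only [pvMemIv]
    constructor
    · rintro ((h | h) | h)
      · exact Or.inl h
      · exact Or.inr ⟨(s, e), by simp, h.1, h.2⟩
      · rcases h with ⟨r, hr, h1⟩; exact Or.inr ⟨r, by simp [hr], h1⟩
    · rintro (h | ⟨r, hr, h1⟩)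
      · exact Or.inl (Or.inl h)
      · rcases List.mem_cons.mp hr with hr | hr
        · subst hr; exact Or.inl (Or.inr ⟨h1.1, h1.2⟩)
        · exact Or.inr ⟨r, hr, h1⟩

theorem pvIncLast_append (Q : List Int) (x : Int) : pvIncLast (Q ++ [x]) = Q ++ [x + 1] := by
  induction Q with
  | nil => rfl
  | cons a q ih =>
    cases q with
    | nil => rfl
    | cons b q' => simpa [pvIncLast] using ih

theorem pvGetD_of_drop (L : List Int) (i : Nat) (x : Int) (r : List Int) (h : L.drop i = x :: r) :
    pvIdxGet L.toArray (i : Int) = x := by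
  have : L[i]? = some x := by
    have h2 : (List.drop i L)[0]? = L[i + 0]? := List.getElem?_drop
    rw [h] at h2
    simpa using h2.symm
  have hlt : i < L.length := by
    by_contra hge
    rw [List.getElem?_eq_none (by omega)] at this
    cases this
  simp [pvIdxGet, Array.getD, hlt]
  rw [List.getElem?_eq_getElem hlt] at this
  exact Option.some.inj this

theorem pvFoldA (L : List Int) (t : List Int) : ∀ (i : Nat) lo prev (P Q R : List Int),
    L.drop i = prev :: t →
    (PySem.List.pyRange (i : Int) ((L.length : Int) - 1) 1).foldl
      (fun st j =>
        if pvIdxGet L.toArray j + 1 = pvIdxGet L.toArray (j + 1) then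
          (st.1, pvIncLast st.2.1, st.2.2)
        else
          (st.1 ++ [pvIdxGet L.toArray (j + 1)],
           st.2.1 ++ [pvIdxGet L.toArray (j + 1)],
           st.2.2 ++ [j + 1]))
      (P ++ [lo], Q ++ [prev], R)
    = (P ++ (pvScanR lo prev i t).1, Q ++ (pvScanR lo prev i t).2.1, R ++ (pvScanR lo prev i t).2.2) := by
  induction t with
  | nil =>
    intro i lo prev P Q R hdrop
    have hlen : L.length = i + 1 := by
      have := congrArg List.length hdrop
      simp [List.length_drop] at this
      omega
    have : PySem.List.pyRange (i : Int) ((L.length : Int) - 1) 1 = [] := by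
      rw [PySem.List.pyRange_one]
      have : ((L.length : Int) - 1 - i) = 0 := by rw [hlen]; push_cast; ring
      simp [this]
    simp [this, pvScanR]
  | cons y ys ih =>
    intro i lo prev P Q R hdrop
    have hlen : L.length = i + ys.length + 2 := by
      have := congrArg List.length hdrop
      simp [List.length_drop] at this
      omega
    have hdrop' : L.drop (i + 1) = y :: ys := by
      have h2 : L.drop (i + 1) = (L.drop i).drop 1 := by
        rw [List.drop_drop, Nat.add_comm]
      rw [h2, hdrop]; rfl
    have hgi : pvIdxGet L.toArray (i : Int) = prev := pvGetD_of_drop L i prev (y :: ys) hdrop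
    have hgi1 : pvIdxGet L.toArray ((i : Int) + 1) = y := by
      have := pvGetD_of_drop L (i + 1) y ys hdrop'
      push_cast at this
      exact this
    have hcons : PySem.List.pyRange (i : Int) ((L.length : Int) - 1) 1
        = (i : Int) :: PySem.List.pyRange ((i : Int) + 1) ((L.length : Int) - 1) 1 := by
      apply PySem.List.pyRange_one_cons
      rw [hlen]; push_cast; omega
    rw [hcons]
    simp only [List.foldl_cons, hgi, hgi1]
    by_cases h : prev + 1 = y
    · rw [if_pos h]
      have h1 := ih (i + 1) lo y P Q R hdrop'
      push_cast at h1
      simp only [pvScanR, if_pos h]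
      rw [← h1]
      congr 1
      · simp [pvIncLast_append, h]
    · rw [if_neg h]
      have h1 := ih (i + 1) y y (P ++ [lo]) (Q ++ [prev]) (R ++ [(i : Int) + 1]) hdrop'
      push_cast at h1
      simp only [pvScanR, if_neg h]
      rw [h1]
      simp


-- closed form of buff_list's membership / of the interval list's coverage
theorem pvIdxFold (M : List (Int × Int)) : ∀ (c : Int) (P : List Int),
    (M.foldl (fun st se => (st.1 ++ [st.2], st.2 + se.2 - se.1 + 1)) (P, c)).1 = P ++ pvIdxList c M := by
  induction M with
  | nil => intro c P; simp [pvIdxList]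
  | cons p M ih =>
    intro c P
    simpa [pvIdxList] using (ih (c + p.2 - p.1 + 1) (P ++ [c]))

-- non-accumulator form of pvAdjDedupGo, for the proofs
def pvAdjDedupTail (prev : Int) : List Int → List Int
  | [] => []
  | y :: ys => if y = prev then pvAdjDedupTail prev ys else y :: pvAdjDedupTail y ys

theorem pvAdjDedupGo_eq (l : List Int) : ∀ prev acc,
    pvAdjDedupGo prev acc l = acc.reverse ++ pvAdjDedupTail prev l := by
  induction l with
  | nil => intro prev acc; simp [pvAdjDedupGo, pvAdjDedupTail]
  | cons y ys ih =>
    intro prev acc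
    by_cases h : y = prev
    · simp [pvAdjDedupGo, pvAdjDedupTail, h, ih]
    · simp [pvAdjDedupGo, pvAdjDedupTail, h, ih]

theorem pvAdjDedup_eq_tail (l : List Int) :
    pvAdjDedup l = match l with | [] => [] | x :: xs => x :: pvAdjDedupTail x xs := by
  cases l with
  | nil => rfl
  | cons x xs => simp [pvAdjDedup, pvAdjDedupGo_eq]

theorem pvAdjDedupTail_mem (l : List Int) : ∀ prev x, (prev :: l).Pairwise (· ≤ ·) →
    (x ∈ pvAdjDedupTail prev l ↔ x ∈ l ∧ x ≠ prev) := by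
  induction l with
  | nil => intro prev x _; simp [pvAdjDedupTail]
  | cons y ys ih =>
    intro prev x hpw
    have h1 : prev ≤ y := (List.pairwise_cons.mp hpw).1 y (by simp)
    have h2 : ∀ z ∈ ys, prev ≤ z := fun z hz => (List.pairwise_cons.mp hpw).1 z (by simp [hz])
    have h3 : ∀ z ∈ ys, y ≤ z := fun z hz => (List.pairwise_cons.mp (List.pairwise_cons.mp hpw).2).1 z hz
    by_cases h : y = prev
    · simp only [pvAdjDedupTail, if_pos h]
      rw [ih prev x (by
        rw [List.pairwise_cons]
        exact ⟨h2, (List.pairwise_cons.mp (List.pairwise_cons.mp hpw).2).2⟩)]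
      subst h
      constructor
      · rintro ⟨hm, hne⟩; exact ⟨by simp [hm], hne⟩
      · rintro ⟨hm, hne⟩
        rcases List.mem_cons.mp hm with rfl | hm
        · exact absurd rfl hne
        · exact ⟨hm, hne⟩
    · simp only [pvAdjDedupTail, if_neg h]
      rw [List.mem_cons, ih y x (List.pairwise_cons.mp hpw).2]
      constructor
      · rintro (rfl | ⟨hm, hne⟩)
        · exact ⟨by simp, fun hc => h (by omega)⟩
        · have := h3 x hm
          exact ⟨by simp [hm], fun hc => h (by omega)⟩
      · rintro ⟨hm, hne⟩
        rcases List.mem_cons.mp hm with rfl | hm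
        · exact Or.inl rfl
        · by_cases hxy : x = y
          · exact Or.inl hxy
          · exact Or.inr ⟨hm, hxy⟩

theorem pvAdjDedupTail_pairwise (l : List Int) : ∀ prev, (prev :: l).Pairwise (· ≤ ·) →
    (prev :: pvAdjDedupTail prev l).Pairwise (· < ·) := by
  induction l with
  | nil => intro prev _; simp [pvAdjDedupTail]
  | cons y ys ih =>
    intro prev hpw
    have h1 : prev ≤ y := (List.pairwise_cons.mp hpw).1 y (by simp)
    have h2 : ∀ z ∈ ys, prev ≤ z := fun z hz => (List.pairwise_cons.mp hpw).1 z (by simp [hz])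
    have h3 : ∀ z ∈ ys, y ≤ z := fun z hz => (List.pairwise_cons.mp (List.pairwise_cons.mp hpw).2).1 z hz
    by_cases h : y = prev
    · simp only [pvAdjDedupTail, if_pos h]
      exact ih prev (by
        rw [List.pairwise_cons]
        exact ⟨h2, (List.pairwise_cons.mp (List.pairwise_cons.mp hpw).2).2⟩)
    · simp only [pvAdjDedupTail, if_neg h]
      have hrec := ih y (List.pairwise_cons.mp hpw).2
      rw [List.pairwise_cons]
      refine ⟨?_, hrec⟩
      intro z hz
      rcases List.mem_cons.mp hz with rfl | hz
      · omega
      · have := (pvAdjDedupTail_mem ys y z (List.pairwise_cons.mp hpw).2).mp hz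
        have := h3 z this.1
        omega

theorem pvAdjDedup_mem (l : List Int) (hpw : l.Pairwise (· ≤ ·)) :
    ∀ x, x ∈ pvAdjDedup l ↔ x ∈ l := by
  intro x
  cases l with
  | nil => simp [pvAdjDedup]
  | cons a l =>
    rw [pvAdjDedup_eq_tail]
    simp only [List.mem_cons]
    rw [pvAdjDedupTail_mem l a x hpw]
    constructor
    · rintro (rfl | ⟨hm, _⟩)
      · exact Or.inl rfl
      · exact Or.inr hm
    · rintro (rfl | hm)
      · exact Or.inl rfl
      · by_cases hxa : x = a
        · exact Or.inl hxa
        · exact Or.inr ⟨hm, hxa⟩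

theorem pvAdjDedup_pairwise (l : List Int) (hpw : l.Pairwise (· ≤ ·)) :
    (pvAdjDedup l).Pairwise (· < ·) := by
  cases l with
  | nil => simp [pvAdjDedup]
  | cons a l => rw [pvAdjDedup_eq_tail]; exact pvAdjDedupTail_pairwise l a hpw

theorem pvBuff_mem (rs re : List Int) (s : String) (x : Int) :
    (x ∈ (s.toList.foldl (fun acc c => acc ++ [(c.toNat : Int)])
        ((rs.zip re).foldl (fun acc se => acc ++ PySem.List.pyRange se.1 (se.2 + 1) 1) []))) ↔
    (∃ se ∈ rs.zip re, se.1 ≤ x ∧ x ≤ se.2) ∨ (∃ c ∈ s.toList, x = (c.toNat : Int)) := by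
  rw [PySem.List.foldl_append_singleton_eq_map, PySem.List.foldl_append_eq_flatMap]
  simp only [List.nil_append, List.mem_append, List.mem_flatMap, List.mem_map,
    PySem.List.mem_pyRange_one, Int.lt_add_one_iff]
  constructor
  · rintro (⟨se, h1, h2⟩ | ⟨c, h1, h2⟩)
    · exact Or.inl ⟨se, h1, h2⟩
    · exact Or.inr ⟨c, h1, h2.symm⟩
  · rintro (⟨se, h1, h2⟩ | ⟨c, h1, h2⟩)
    · exact Or.inl ⟨se, h1, h2⟩
    · exact Or.inr ⟨c, h1, h2.symm⟩

theorem pvIv_mem (rs re : List Int) (s : String) (x : Int) :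
    pvMemIv x (s.toList.foldl (fun acc c => acc ++ [((c.toNat : Int), (c.toNat : Int))])
        ((rs.zip re).filter (fun se => decide (se.1 ≤ se.2)))) ↔
    (∃ se ∈ rs.zip re, se.1 ≤ x ∧ x ≤ se.2) ∨ (∃ c ∈ s.toList, x = (c.toNat : Int)) := by
  rw [PySem.List.foldl_append_singleton_eq_map]
  simp only [pvMemIv, List.mem_append, List.mem_filter, List.mem_map, decide_eq_true_eq]
  constructor
  · rintro ⟨p, hp | hp, h1, h2⟩
    · exact Or.inl ⟨p, hp.1, h1, h2⟩
    · rcases hp with ⟨c, hc, rfl⟩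
      exact Or.inr ⟨c, hc, by simp at h1 h2; omega⟩
  · rintro (⟨se, h1, h2⟩ | ⟨c, h1, h2⟩)
    · exact ⟨se, Or.inl ⟨h1, by omega⟩, h2⟩
    · exact ⟨((c.toNat : Int), (c.toNat : Int)), Or.inr ⟨c, h1, rfl⟩, by simp [h2]⟩

theorem pvIv_wf (rs re : List Int) (s : String) :
    ∀ p ∈ (s.toList.foldl (fun acc c => acc ++ [((c.toNat : Int), (c.toNat : Int))])
        ((rs.zip re).filter (fun se => decide (se.1 ≤ se.2)))), p.1 ≤ p.2 := by
  rw [PySem.List.foldl_append_singleton_eq_map]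
  intro p hp
  rcases List.mem_append.mp hp with hp | hp
  · exact of_decide_eq_true (List.mem_filter.mp hp).2
  · rcases List.mem_map.mp hp with ⟨c, _, rfl⟩
    exact le_rfl

theorem pvA_eq (rs re : List Int) (s : String) (h : Int) (t : List Int)
    (hL : pvAdjDedup ((s.toList.foldl (fun acc c => acc ++ [(c.toNat : Int)])
          ((rs.zip re).foldl (fun acc se => acc ++ PySem.List.pyRange se.1 (se.2 + 1) 1) [])).mergeSort
        (fun a b => decide (a ≤ b))) = h :: t) :
    SortRanges rs re s
      = ((pvRuns h h t).map Prod.fst, (pvRuns h h t).map Prod.snd, pvIdxList 0 (pvRuns h h t)) := by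
  simp only [SortRanges]
  rw [hL]
  dsimp only
  have hfold := pvFoldA (h :: t) t 0 h h [] [] [0] (by simp)
  simp only [List.nil_append, Nat.cast_zero] at hfold
  rw [hfold]
  rw [pvScanR_fst, pvScanR_snd]
  have hidx := pvScanR_idx t h h 0 0 (by ring)
  simp only [List.cons_append, List.nil_append]
  rw [← hidx]

theorem pvB_eq (rs re : List Int) (s : String) (h : Int) (t : List Int)
    (hM : (PySem.List.sorted
        (s.toList.foldl (fun acc c => acc ++ [((c.toNat : Int), (c.toNat : Int))])
          ((rs.zip re).filter (fun se => decide (se.1 ≤ se.2))))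
        (fun p => p.1) false).foldl pvMergeStep [] = pvRuns h h t) :
    SortRanges_alt rs re s
      = ((pvRuns h h t).map Prod.fst, (pvRuns h h t).map Prod.snd, pvIdxList 0 (pvRuns h h t)) := by
  simp only [SortRanges_alt]
  rw [hM, pvIdxFold]
  rfl

-- ===== VERDICT (by name: the statement is the Claim_ definition above) =====
theorem SortRanges_spec : Claim_equal_SortRanges := by
  intro rs re s _ hpre
  unfold Spec_SortRanges
  -- shared data
  have hbuffmem := pvBuff_mem rs re s
  -- the sorted deduplicated codepoint list
  have hmspw : ((s.toList.foldl (fun acc c => acc ++ [(c.toNat : Int)])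
      ((rs.zip re).foldl (fun acc se => acc ++ PySem.List.pyRange se.1 (se.2 + 1) 1) [])).mergeSort
      (fun a b => decide (a ≤ b))).Pairwise (· ≤ ·) := by
    have := List.pairwise_mergeSort (le := fun a b : Int => decide (a ≤ b))
      (fun a b c hab hbc => by simp at *; omega) (fun a b => by simp; omega)
      (s.toList.foldl (fun acc c => acc ++ [(c.toNat : Int)])
        ((rs.zip re).foldl (fun acc se => acc ++ PySem.List.pyRange se.1 (se.2 + 1) 1) []))
    exact this.imp (fun hab => by simpa using hab)
  have hLmem0 : ∀ x : Int, x ∈ pvAdjDedup ((s.toList.foldl (fun acc c => acc ++ [(c.toNat : Int)])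
      ((rs.zip re).foldl (fun acc se => acc ++ PySem.List.pyRange se.1 (se.2 + 1) 1) [])).mergeSort
      (fun a b => decide (a ≤ b))) ↔
      ((∃ se ∈ rs.zip re, se.1 ≤ x ∧ x ≤ se.2) ∨ (∃ c ∈ s.toList, x = (c.toNat : Int))) := by
    intro x
    rw [pvAdjDedup_mem _ hmspw, List.mem_mergeSort, hbuffmem]
  obtain ⟨h, t, hL⟩ : ∃ h t, pvAdjDedup ((s.toList.foldl (fun acc c => acc ++ [(c.toNat : Int)])
      ((rs.zip re).foldl (fun acc se => acc ++ PySem.List.pyRange se.1 (se.2 + 1) 1) [])).mergeSort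
      (fun a b => decide (a ≤ b))) = h :: t := by
    cases hc : pvAdjDedup ((s.toList.foldl (fun acc c => acc ++ [(c.toNat : Int)])
        ((rs.zip re).foldl (fun acc se => acc ++ PySem.List.pyRange se.1 (se.2 + 1) 1) [])).mergeSort
        (fun a b => decide (a ≤ b))) with
    | cons a l => exact ⟨a, l, rfl⟩
    | nil =>
      exfalso
      rcases hpre with hs | ⟨p, hp, hple⟩
      · obtain ⟨c, hc'⟩ : ∃ c, c ∈ s.toList := by
          cases hsl : s.toList with
          | nil => exact absurd (String.toList_eq_nil_iff.mp hsl) hs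
          | cons a l => exact ⟨a, by simp⟩
        have := (hLmem0 (c.toNat : Int)).mpr (Or.inr ⟨c, hc', rfl⟩)
        rw [hc] at this; simp at this
      · have := (hLmem0 p.1).mpr (Or.inl ⟨p, hp, le_rfl, hple⟩)
        rw [hc] at this; simp at this
  -- L = h :: t is strictly increasing, and its members are the covered codepoints
  have hLpw : (h :: t).Pairwise (· < ·) := by
    rw [← hL]; exact pvAdjDedup_pairwise _ hmspw
  have hLmem : ∀ x : Int, x ∈ (h :: t) ↔
      ((∃ se ∈ rs.zip re, se.1 ≤ x ∧ x ≤ se.2) ∨ (∃ c ∈ s.toList, x = (c.toNat : Int))) := by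
    intro x
    rw [← hL, hLmem0]
  -- B's merged interval list
  have hivpw := PySem.List.sorted_pairwise
      (s.toList.foldl (fun acc c => acc ++ [((c.toNat : Int), (c.toNat : Int))])
        ((rs.zip re).filter (fun se => decide (se.1 ≤ se.2)))) (fun p => p.1)
  have hivwf : ∀ p ∈ PySem.List.sorted
      (s.toList.foldl (fun acc c => acc ++ [((c.toNat : Int), (c.toNat : Int))])
        ((rs.zip re).filter (fun se => decide (se.1 ≤ se.2)))) (fun p => p.1) false, p.1 ≤ p.2 := by
    intro p hp
    exact pvIv_wf rs re s p ((PySem.List.mem_sorted _ _ _ p).mp hp)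
  have hminv := pvMerge_inv (PySem.List.sorted
      (s.toList.foldl (fun acc c => acc ++ [((c.toNat : Int), (c.toNat : Int))])
        ((rs.zip re).filter (fun se => decide (se.1 ≤ se.2)))) (fun p => p.1) false)
      [] hivwf hivpw ⟨by simp, by simp⟩ (by simp)
  -- the two interval lists have the same coverage, hence are equal
  have hM : (PySem.List.sorted
      (s.toList.foldl (fun acc c => acc ++ [((c.toNat : Int), (c.toNat : Int))])
        ((rs.zip re).filter (fun se => decide (se.1 ≤ se.2)))) (fun p => p.1) false).foldl
        pvMergeStep [] = pvRuns h h t := by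
    apply pvWF_unique _ _ hminv.1 (pvRuns_WF t h h le_rfl hLpw)
    intro x
    rw [(hminv.2 x)]
    have hrm := pvRuns_mem t h h x le_rfl hLpw
    rw [hrm]
    have hivm : pvMemIv x (PySem.List.sorted
        (s.toList.foldl (fun acc c => acc ++ [((c.toNat : Int), (c.toNat : Int))])
          ((rs.zip re).filter (fun se => decide (se.1 ≤ se.2)))) (fun p => p.1) false) ↔
        pvMemIv x (s.toList.foldl (fun acc c => acc ++ [((c.toNat : Int), (c.toNat : Int))])
          ((rs.zip re).filter (fun se => decide (se.1 ≤ se.2)))) := by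
      unfold pvMemIv
      constructor
      · rintro ⟨p, hp, h1⟩; exact ⟨p, (PySem.List.mem_sorted _ _ _ p).mp hp, h1⟩
      · rintro ⟨p, hp, h1⟩; exact ⟨p, (PySem.List.mem_sorted _ _ _ p).mpr hp, h1⟩
    rw [hivm, pvIv_mem rs re s x, ← hLmem x]
    simp only [pvMemIv]
    constructor
    · rintro (⟨p, hp, _⟩ | hmem)
      · simp at hp
      · rcases List.mem_cons.mp hmem with rfl | hmem
        · exact Or.inl ⟨le_rfl, le_rfl⟩
        · exact Or.inr hmem
    · rintro (⟨h1, h2⟩ | h1)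
      · have hxh : x = h := le_antisymm h2 h1
        exact Or.inr (hxh ▸ List.mem_cons_self)
      · exact Or.inr (List.mem_cons_of_mem _ h1)
  rw [pvA_eq rs re s h t hL, pvB_eq rs re s h t hM]

theorem SortRanges_raises : Claim_raises_SortRanges := by
  unfold Claim_raises_SortRanges
  constructor
  · intro rs re s _ hr hp
    rcases hp with h | ⟨p, hp, hle⟩
    · exact h hr.1
    · exact absurd hle (not_le.mpr (hr.2 p hp))
  · exact ⟨by decide, by decide, by decide⟩

-- self-check consuming the raises claim: B's port indeed returns the stated value at the raise witness
theorem pvRaiseWitness_ok : SortRanges_alt ([] : List Int) ([] : List Int) "" = ([], [], []) :=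
  SortRanges_raises.2.2.2
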